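-- pv_equiv track=rewrite | github.com/christine-M9/Codility | codility/index.py | solution
-- ===== SOURCE A (Python) =====
-- def solution(R):
--     max_indicator = 0  # keeps track of max pothole
--     pothole_depth = 0  # keeps depth of current pothole
--     pothole_count = 0  # keeps count of consecutive potholes
--
-- # a loop that iterates through R elements
--     for r in R:
--         if r == 0: #if the current seg is smooth , calculate current pothole (p.d * p.c ) & update max indicator if its larger.
--             max_indicator = max(max_indicator, pothole_depth * pothole_count)
--             pothole_depth = 0
--             pothole_count = 0
--
-- # if current seg has a pothole, update p.d to be max of current depth.
-- # increment p.c to account for the consecutive potholes.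
--         else:
--             pothole_depth = max(pothole_depth, r)
--             pothole_count += 1
--
-- # ensure any remaining pothole is handled & return the maximum indicator.
--     max_indicator = max(max_indicator, pothole_depth * pothole_count)
--
--     return max_indicator
-- ===== SOURCE B (Python) =====
-- def solution(R):
--     # group-then-reduce: partition R into maximal runs of nonzero elements,
--     # score each run as max(0, *run) * len(run), take the overall max (0 if no runs)
--     def runs(xs):
--         out = []
--         i = 0
--         n = len(xs)
--         while i < n:
--             if xs[i] == 0:
--                 i += 1
--             else:
--                 j = i
--                 while j < n and xs[j] != 0:
--                     j += 1
--                 out.append(xs[i:j])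
--                 i = j
--         return out
--     return max((max(0, *g) * len(g) for g in runs(R)), default=0)
-- ===== Notes on version B (the rewrite author's own statement) =====
-- stated objective: alternative
-- what changed: Replaces A's running state-machine (depth/count accumulators flushed at each zero) with a group-then-reduce pass: partition R into maximal nonzero runs, score each run as max(0,*run)*len(run), and take the overall maximum with default 0.
import Mathlib
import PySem

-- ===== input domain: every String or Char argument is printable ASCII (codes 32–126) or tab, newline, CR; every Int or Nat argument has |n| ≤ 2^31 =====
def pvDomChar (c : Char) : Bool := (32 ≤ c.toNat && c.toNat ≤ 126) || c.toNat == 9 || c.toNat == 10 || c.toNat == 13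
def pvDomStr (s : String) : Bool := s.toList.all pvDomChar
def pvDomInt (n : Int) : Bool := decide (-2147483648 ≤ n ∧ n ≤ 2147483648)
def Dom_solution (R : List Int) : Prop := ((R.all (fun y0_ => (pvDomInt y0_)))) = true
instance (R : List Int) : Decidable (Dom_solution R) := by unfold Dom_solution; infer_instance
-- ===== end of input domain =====

-- B replaces A's running state-machine with a group-then-reduce pass over maximal nonzero runs (alternative decomposition, same cost).


-- ===== PORT A =====
-- the loop body of A: state = (max_indicator, pothole_depth, pothole_count)
def pvStepA (s : Int × Int × Int) (r : Int) : Int × Int × Int :=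
  if r = 0 then (max s.1 (s.2.1 * s.2.2), 0, 0)
  else (s.1, max s.2.1 r, s.2.2 + 1)

def solution (R : List Int) : Int :=
  let s := R.foldl pvStepA (0, 0, 0)
  max s.1 (s.2.1 * s.2.2)

-- ===== PORT B =====
-- maximal runs of consecutive nonzero elements (B's `runs` scan, as takeWhile/dropWhile recursion)
def pvRuns : List Int → List (List Int)
  | [] => []
  | x :: xs =>
    if x = 0 then pvRuns xs
    else (x :: xs.takeWhile (· ≠ 0)) :: pvRuns (xs.dropWhile (· ≠ 0))
termination_by xs => xs.length
decreasing_by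
  · simp
  · exact Nat.lt_succ_of_le (List.length_dropWhile_le _ _)

-- score of one run: max(0, *g) * len(g)
def pvVal (g : List Int) : Int := g.foldl max 0 * (g.length : Int)

def solution_alt (R : List Int) : Int :=
  ((pvRuns R).map pvVal).foldl max 0

-- ===== PRECONDITION & SPEC =====
def Spec_solution (R : List Int) (out : Int) : Prop := out = solution_alt R
instance (R : List Int) (out : Int) : Decidable (Spec_solution R out) := by unfold Spec_solution; infer_instance

-- ===== CLAIM (what is proved, stated in full; the proofs are below) =====
def Claim_equal_solution : Prop := ∀ (R : List Int), Dom_solution R → Spec_solution R (solution R)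

-- ===== LEMMAS AND PROOFS =====

theorem pvRuns_nil : pvRuns [] = [] := by simp [pvRuns]

theorem pvRuns_cons (x : Int) (xs : List Int) :
    pvRuns (x :: xs) = if x = 0 then pvRuns xs
      else (x :: xs.takeWhile (· ≠ 0)) :: pvRuns (xs.dropWhile (· ≠ 0)) := by
  rw [pvRuns]

-- main invariant: finishing A's fold from state (m,d,c) equals folding max over the
-- score of the current (partially consumed) run extended by takeWhile, then the runs of the rest
theorem pvMain (xs : List Int) (m d c : Int) (hm : 0 ≤ m) :
    (let s := xs.foldl pvStepA (m, d, c); max s.1 (s.2.1 * s.2.2)) =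
      ((pvRuns (xs.dropWhile (· ≠ 0))).map pvVal).foldl max
        (max m ((xs.takeWhile (· ≠ 0)).foldl max d * (c + (xs.takeWhile (· ≠ 0)).length))) := by
  induction xs generalizing m d c with
  | nil => simp [pvRuns_nil]
  | cons x xs ih =>
    by_cases hx : x = 0
    · subst hx
      simp only [List.foldl_cons, pvStepA, if_true]
      rw [ih _ _ _ (le_trans hm (le_max_left _ _))]
      simp only [List.takeWhile_cons, List.dropWhile_cons]
      norm_num
      cases xs with
      | nil =>
        simp [pvRuns_nil, pvRuns_cons]
        omega
      | cons y ys =>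
        by_cases hy : y = 0
        · subst hy
          simp [pvRuns_cons]
          congr 1
          omega
        · simp only [List.takeWhile_cons, List.dropWhile_cons, hy,
            decide_not, pvRuns_cons]
          simp [pvVal, max_assoc]
    · simp only [List.foldl_cons, pvStepA, if_neg hx]
      rw [ih _ _ _ hm]
      simp only [List.takeWhile_cons, List.dropWhile_cons, hx, decide_not]
      simp [List.foldl_cons, add_assoc, add_comm 1 (_ : Int)]

theorem pv_eq (R : List Int) : solution R = solution_alt R := by
  unfold solution solution_alt
  rw [pvMain R 0 0 0 le_rfl]
  cases R with
  | nil => simp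
  | cons x xs =>
    by_cases hx : x = 0
    · subst hx
      simp [pvRuns_cons]
    · simp only [List.takeWhile_cons, List.dropWhile_cons, hx, decide_not,
        pvRuns_cons]
      simp [pvVal, add_comm]

-- ===== VERDICT (by name: the statement is the Claim_ definition above) =====
theorem solution_spec : Claim_equal_solution := by
  intro R _
  unfold Spec_solution
  exact pv_eq R
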